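-- pv_equiv track=rewrite | github.com/Sacach/Basics-of-the-Internet-course | CourseWork_Latva_Orava_Saastamoinen.py | inv_parity
-- ===== SOURCE A (Python) =====
-- def get_parity(n):
--     """
--     Luo parity bitin muuttujalle n
--     Kopioitu harjoitustyön ohjeesta
--     """
--     while n > 1:
--         n = (n >> 1) ^ (n & 1)
--     return n
--
-- def inv_parity(str):
--     # alustetaan p, johon tehdään epäparitettu merkkijono
--     p = ""
--     # for looppi jolla käydään merkit läpi
--     for x in str:
--         # x:n unicode arvo
--         x = ord(x)
--         # poimitaan x:n binäärimuodosta pariteettibitti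
--         binary = bin(x)
--         p_bit = binary[-1]
--         # right shift yhdellä
--         x >>= 1
--         # jos pariteettibitti on virheellinen, palautetaan tähän asti saatu p ja false
--         if int(p_bit) != int(get_parity(x)):
--             return p, False
--         # muutetaan x merkiksi
--         x = chr(x)
--         # lisätään saatu merkki epäparitettuun merkkijonoon
--         p += x
--     # palautetaan valmis merkkijono ja true
--     return p, True
-- ===== SOURCE B (Python) =====
-- def inv_parity(str):
--     codes = [ord(c) for c in str]
--     bad = next((i for i, v in enumerate(codes) if bin(v).count('1') % 2), None)
--     if bad is None:
--         return ''.join(chr(v >> 1) for v in codes), True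
--     return ''.join(chr(v >> 1) for v in codes[:bad]), False
-- ===== Notes on version B (the rewrite author's own statement) =====
-- stated objective: alternative
-- what changed: B is staged instead of a single accumulator loop: it maps the string to its code list, locates the first code with odd total popcount (replacing A's extract-parity-bit / shift / get_parity-fold comparison), and builds the output by join of the shifted prefix, returning validity from whether a bad index exists.
import Mathlib
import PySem

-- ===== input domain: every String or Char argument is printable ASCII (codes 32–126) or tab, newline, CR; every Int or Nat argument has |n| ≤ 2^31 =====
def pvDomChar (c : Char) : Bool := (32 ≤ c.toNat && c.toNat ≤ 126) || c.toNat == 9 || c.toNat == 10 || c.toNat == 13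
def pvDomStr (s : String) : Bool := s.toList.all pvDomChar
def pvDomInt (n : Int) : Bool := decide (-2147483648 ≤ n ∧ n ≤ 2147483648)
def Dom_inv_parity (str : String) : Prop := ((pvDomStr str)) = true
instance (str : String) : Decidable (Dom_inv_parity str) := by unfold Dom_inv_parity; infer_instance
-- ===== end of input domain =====

-- B is staged (map to codes, find first odd-popcount code, join the shifted prefix)
-- instead of A's single accumulator loop with a parity-bit/get_parity comparison.

-- ===== PORT A =====
-- while n > 1: n = (n >> 1) ^ (n & 1); ported with fuel (the loop's value shrinks each
-- step, so fuel = the initial n is always enough; fuel only makes the same loop total)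
def get_parity_loop (fuel n : Nat) : Nat :=
  match fuel with
  | 0 => n
  | f + 1 => if n > 1 then get_parity_loop f ((n >>> 1) ^^^ (n &&& 1)) else n

def get_parity (n : Nat) : Nat := get_parity_loop n n

def inv_parity_go (l : List Char) (p : String) : String × Bool :=
  match l with
  | [] => (p, true)
  | x :: rest =>
    let v := x.toNat                 -- ord(x) (char codes are ≥ 0, so Nat is exact)
    let p_bit := v % 2               -- int(bin(v)[-1]) = v % 2, exact for v ≥ 0
    let v' := v >>> 1                -- x >>= 1
    if p_bit ≠ get_parity v' then (p, false)
    else inv_parity_go rest (p.push (Char.ofNat v'))   -- p += chr(x)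

def inv_parity (str : String) : String × Bool :=
  inv_parity_go str.toList ""

-- ===== PORT B =====
-- bin(v).count('1') % 2 ≠ 0 : odd popcount, via the binary-digit list (bin's digits)
def oddPop (v : Nat) : Bool := (Nat.bits v).count true % 2 == 1

def inv_parity_alt (str : String) : String × Bool :=
  let codes := str.toList.map Char.toNat
  match codes.findIdx? oddPop with
  | none => (String.ofList (codes.map fun v => Char.ofNat (v >>> 1)), true)
  | some i => (String.ofList ((codes.take i).map fun v => Char.ofNat (v >>> 1)), false)

-- ===== PRECONDITION & SPEC =====
def Spec_inv_parity (str : String) (out : String × Bool) : Prop := out = inv_parity_alt str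
instance (str : String) (out : String × Bool) : Decidable (Spec_inv_parity str out) := by unfold Spec_inv_parity; infer_instance

-- ===== CLAIM (what is proved, stated in full; the proofs are below) =====
def Claim_equal_inv_parity : Prop := ∀ (str : String), Dom_inv_parity str → Spec_inv_parity str (inv_parity str)

-- ===== LEMMAS AND PROOFS =====
-- the two per-character validity tests agree on every ASCII code
theorem cond_agree : ∀ v : Fin 128,
    ((v.val % 2 ≠ get_parity (v.val >>> 1)) ↔ oddPop v.val = true) := by decide

theorem push_mk (p : String) (c : Char) (cs : List Char) :
    (p.push c) ++ String.ofList cs = p ++ String.ofList (c :: cs) := by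
  apply String.toList_inj.mp
  simp

theorem go_eq (l : List Char) (h : l.all pvDomChar = true) (p : String) :
    inv_parity_go l p =
      match (l.map Char.toNat).findIdx? oddPop with
      | none => (p ++ String.ofList ((l.map Char.toNat).map fun v => Char.ofNat (v >>> 1)), true)
      | some i => (p ++ String.ofList (((l.map Char.toNat).take i).map fun v => Char.ofNat (v >>> 1)), false) := by
  induction l generalizing p with
  | nil => simp [inv_parity_go]
  | cons x rest ih =>
    simp only [List.all_cons, Bool.and_eq_true] at h
    have hx : x.toNat < 128 := by
      have := h.1; simp [pvDomChar] at this; omega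
    have hc := cond_agree ⟨x.toNat, hx⟩
    simp only [inv_parity_go, List.map_cons, List.findIdx?_cons]
    by_cases hb : oddPop x.toNat = true
    · rw [if_pos (hc.mpr hb)]
      simp [hb]
    · rw [if_neg (fun hn => hb (hc.mp hn))]
      rw [ih h.2]
      simp only [Bool.not_eq_true] at hb
      simp only [hb]
      cases hfi : (rest.map Char.toNat).findIdx? oddPop with
      | none => simp [push_mk]
      | some i => simp [push_mk]

-- ===== VERDICT (by name: the statement is the Claim_ definition above) =====
theorem inv_parity_spec : Claim_equal_inv_parity := by
  intro s hd
  unfold Spec_inv_parity inv_parity inv_parity_alt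
  rw [go_eq _ hd]
  cases hfi : (s.toList.map Char.toNat).findIdx? oddPop <;>
    simp [hfi, String.ofList]
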